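-- pv_equiv track=rewrite | github.com/namel3ss-Ai/namel3ss | src/namel3ss/runtime/providers/guardrails.py | _dedupe_sorted
-- ===== SOURCE A (Python) =====
-- def _dedupe_sorted(entries: list[dict[str, str]]) -> list[dict[str, str]]:
--     deduped: dict[str, dict[str, str]] = {}
--     for entry in entries:
--         code = str(entry.get("stable_code") or "").strip()
--         if not code or code in deduped:
--             continue
--         deduped[code] = entry
--     return [deduped[key] for key in sorted(deduped)]
-- ===== SOURCE B (Python) =====
-- def _dedupe_sorted(entries: list[dict[str, str]]) -> list[dict[str, str]]:
--     pairs = []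
--     for entry in entries:
--         code = str(entry.get("stable_code") or "").strip()
--         if code:
--             pairs.append((code, entry))
--     pairs.sort(key=lambda p: p[0])
--     result = []
--     prev = None
--     for code, entry in pairs:
--         if code != prev:
--             result.append(entry)
--             prev = code
--     return result
-- ===== Notes on version B (the rewrite author's own statement) =====
-- stated objective: alternative
-- what changed: Replaces the dict-based dedup (membership test, keyed insert, then sort of the keys with a lookup per key) by a dict-free pipeline: collect (code, entry) pairs, stable-sort them by code, and emit one entry per run of equal codes in a single adjacent-dedup pass.
import Mathlib
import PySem

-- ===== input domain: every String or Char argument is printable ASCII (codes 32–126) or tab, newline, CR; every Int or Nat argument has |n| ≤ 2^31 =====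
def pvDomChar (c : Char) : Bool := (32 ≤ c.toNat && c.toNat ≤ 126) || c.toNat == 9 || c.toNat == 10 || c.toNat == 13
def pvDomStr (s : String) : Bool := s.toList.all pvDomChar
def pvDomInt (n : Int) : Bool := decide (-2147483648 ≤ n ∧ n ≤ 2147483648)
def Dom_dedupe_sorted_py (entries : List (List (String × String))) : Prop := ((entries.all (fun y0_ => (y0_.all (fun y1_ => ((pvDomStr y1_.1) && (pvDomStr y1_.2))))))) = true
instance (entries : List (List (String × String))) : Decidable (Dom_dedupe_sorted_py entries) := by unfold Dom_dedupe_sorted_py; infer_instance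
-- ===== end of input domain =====

-- B is an alternative, dict-free implementation: it stable-sorts the (code, entry)
-- pairs by code and dedupes adjacent equal codes in one pass; same cost as A.

-- code = str(entry.get("stable_code") or "").strip()   (shared by both Pythons verbatim)
def pvCode (entry : List (String × String)) : String :=
  PySem.Str.strip (((PySem.Dict.mk entry).get? "stable_code").getD "")

-- ===== PORT A =====
def dedupe_sorted_py (entries : List (List (String × String))) : List (List (String × String)) :=
  let d : PySem.Dict String (List (String × String)) :=
    entries.foldl
      (fun d entry =>
        let code := pvCode entry
        if code = "" || d.contains code then d else d.insert code entry)
      PySem.Dict.empty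
  -- [deduped[key] for key in sorted(deduped)]  (key always present: getD is exact)
  (PySem.List.sorted d.keys (fun k => k) false).map (fun k => d.getD k [])

-- ===== PORT B =====
-- first loop of Source B: the (code, entry) pairs with non-empty code, in order
def pvPairs (entries : List (List (String × String))) : List (String × List (String × String)) :=
  entries.foldl
    (fun acc entry =>
      let code := pvCode entry
      if code = "" then acc else acc ++ [(code, entry)])
    []

def dedupe_sorted_py_alt (entries : List (List (String × String))) : List (List (String × String)) :=
  let sortedPairs := PySem.List.sorted (pvPairs entries) (fun p => p.1) false
  (sortedPairs.foldl
      (fun (st : List (List (String × String)) × Option String) p =>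
        if some p.1 ≠ st.2 then (st.1 ++ [p.2], some p.1) else st)
      ([], none)).1

-- ===== PRECONDITION & SPEC =====
def Spec_dedupe_sorted_py (entries : List (List (String × String))) (out : List (List (String × String))) : Prop := out = dedupe_sorted_py_alt entries
instance (entries : List (List (String × String))) (out : List (List (String × String))) : Decidable (Spec_dedupe_sorted_py entries out) := by unfold Spec_dedupe_sorted_py; infer_instance

-- ===== CLAIM (what is proved, stated in full; the proofs are below) =====
def Claim_equal_dedupe_sorted_py : Prop := ∀ (entries : List (List (String × String))), Dom_dedupe_sorted_py entries → Spec_dedupe_sorted_py entries (dedupe_sorted_py entries)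

-- ===== LEMMAS AND PROOFS =====

def pvDD {E : Type} : List (String × E) → List (String × E)
  | [] => []
  | (c, e) :: t => (c, e) :: pvDD (t.filter (fun p => decide (p.1 ≠ c)))
termination_by l => l.length
decreasing_by
  simp only [List.length_cons, List.length_unattach]
  exact Nat.lt_succ_of_le (le_trans (List.length_filter_le _ _) (by simp))
theorem pvDD_nil {E : Type} : pvDD ([] : List (String × E)) = [] := by simp [pvDD]
theorem pvDD_cons {E : Type} (c : String) (e : E) (t : List (String × E)) :
    pvDD ((c, e) :: t) = (c, e) :: pvDD (t.filter (fun p => decide (p.1 ≠ c))) := by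
  rw [pvDD]

theorem pvDD_induction {E : Type} (P : List (String × E) → Prop)
    (h0 : P ([] : List (String × E)))
    (h1 : ∀ (c : String) (e : E) (t : List (String × E)),
      P (t.filter (fun p => decide (p.1 ≠ c))) → P ((c, e) :: t)) :
    ∀ l : List (String × E), P l := by
  intro l
  induction hn : l.length using Nat.strong_induction_on generalizing l with
  | _ n ih =>
    match l, hn with
    | [], _ => exact h0
    | (c, e) :: t, hn =>
      refine h1 c e t (ih _ ?_ _ rfl)
      subst hn
      simp only [List.length_cons]
      exact Nat.lt_succ_of_le (List.length_filter_le _ _)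

theorem pvDD_sublist {E : Type} (l : List (String × E)) : (pvDD l).Sublist l := by
  induction l using pvDD_induction with
  | h0 => simp [pvDD_nil]
  | h1 c e t ih =>
      rw [pvDD_cons]
      exact List.Sublist.cons₂ _ (ih.trans List.filter_sublist)

theorem pvDD_keys_nodup {E : Type} (l : List (String × E)) : ((pvDD l).map Prod.fst).Nodup := by
  induction l using pvDD_induction with
  | h0 => simp [pvDD_nil]
  | h1 c e t ih =>
      rw [pvDD_cons]
      refine List.Nodup.cons ?_ ih
      intro hc
      have hsub := (pvDD_sublist (t.filter (fun p => decide (p.1 ≠ c)))).map Prod.fst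
      have h2 := hsub.mem hc
      simp only [List.mem_map] at h2
      obtain ⟨p, hp, rfl⟩ := h2
      have := List.of_mem_filter hp
      simp at this

theorem pvDD_mem_fst {E : Type} (l : List (String × E)) (a : String) :
    a ∈ (pvDD l).map Prod.fst ↔ a ∈ l.map Prod.fst := by
  induction l using pvDD_induction with
  | h0 => simp [pvDD_nil]
  | h1 c e t ih =>
      rw [pvDD_cons]
      by_cases hac : a = c
      · simp [hac]
      · simp only [List.map_cons, List.mem_cons, ih, List.mem_map]
        constructor
        · rintro (h | ⟨p, hp, rfl⟩)
          · exact Or.inl h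
          · exact Or.inr ⟨p, List.mem_of_mem_filter hp, rfl⟩
        · rintro (h | ⟨p, hp, rfl⟩)
          · exact Or.inl h
          · exact Or.inr ⟨p, List.mem_filter.2 ⟨hp, by simpa using hac⟩, rfl⟩

theorem pv_find?_filter_ne {E : Type} (t : List (String × E)) (a c : String) (h : a ≠ c) :
    (t.filter (fun p => decide (p.1 ≠ c))).find? (fun q => q.1 == a) = t.find? (fun q => q.1 == a) := by
  induction t with
  | nil => rfl
  | cons y ys ih =>
      rw [List.filter_cons]
      by_cases hyc : y.1 = c
      · rw [if_neg (by simp [hyc])]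
        have hb : (y.1 == a) = false := by simp [hyc]; exact fun h' => h h'.symm
        rw [List.find?_cons, hb, ih]
      · rw [if_pos (by simp [hyc])]
        rw [List.find?_cons, List.find?_cons]
        cases hb : (y.1 == a)
        · simp only [hb]; exact ih
        · simp only [hb]

theorem pv_mem_pvDD_iff {E : Type} (l : List (String × E)) (p : String × E) :
    p ∈ pvDD l ↔ l.find? (fun q => q.1 == p.1) = some p := by
  induction l using pvDD_induction with
  | h0 => simp [pvDD_nil]
  | h1 c e t ih =>
      rw [pvDD_cons]
      by_cases hpc : p.1 = c
      · have hb : ((c, e).1 == p.1) = true := by simp [hpc]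
        simp only [List.mem_cons, List.find?_cons, hb]
        constructor
        · rintro (rfl | hmem)
          · rfl
          · exfalso
            have h1 := (pvDD_sublist _).mem hmem
            have h2 := List.of_mem_filter h1
            simp [hpc] at h2
        · intro h2
          left
          exact (Option.some_inj.mp h2).symm
      · have hb : ((c, e).1 == p.1) = false := by simp; exact fun h' => hpc h'.symm
        simp only [List.mem_cons, List.find?_cons, hb]
        constructor
        · rintro (rfl | hmem)
          · simp at hpc
          · rw [← pv_find?_filter_ne t p.1 c hpc]
            exact ih.1 hmem
        · intro h2
          right
          exact ih.2 (by rw [pv_find?_filter_ne t p.1 c hpc]; exact h2)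

theorem pvDD_snoc {E : Type} (l : List (String × E)) (x : String × E) :
    pvDD (l ++ [x]) = pvDD l ++ (if x.1 ∈ l.map Prod.fst then [] else [x]) := by
  induction l using pvDD_induction with
  | h0 =>
      obtain ⟨c, e⟩ := x
      simp [pvDD_cons, pvDD_nil]
  | h1 c e t ih =>
      rw [List.cons_append, pvDD_cons, List.filter_append, pvDD_cons]
      by_cases hxc : x.1 = c
      · simp [hxc]
      · rw [List.filter_cons, if_pos (by simp [hxc]), List.filter_nil, ih]
        have hiff : (x.1 ∈ (t.filter (fun p => decide (p.1 ≠ c))).map Prod.fst) ↔ (x.1 ∈ ((c, e) :: t).map Prod.fst) := by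
          simp [List.mem_filter, hxc]
        by_cases hmem : x.1 ∈ ((c, e) :: t).map Prod.fst
        · rw [if_pos (hiff.2 hmem), if_pos hmem]
          simp
        · rw [if_neg (fun h => hmem (hiff.1 h)), if_neg hmem]
          simp

theorem pv_find?_insertBy {E : Type} (c : String) (x : String × E) :
    ∀ (acc : List (String × E)), acc.Pairwise (fun a b => a.1 ≤ b.1) →
    (PySem.List.insertBy (fun a b => decide (a.1 < b.1)) x acc).find? (fun q => q.1 == c)
      = (acc.find? (fun q => q.1 == c)).or (if x.1 == c then some x else none) := by
  intro acc
  induction acc with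
  | nil =>
      intro _
      simp only [PySem.List.insertBy, List.find?_cons, List.find?_nil, Option.none_or]
      cases hb : (x.1 == c) <;> simp [hb]
  | cons y ys ih =>
      intro hpw
      rw [PySem.List.insertBy]
      by_cases hlt : x.1 < y.1
      · rw [if_pos (by simpa using hlt)]
        rw [List.find?_cons]
        cases hb : (x.1 == c)
        · simp only [hb]
          simp
        · have hxc : x.1 = c := by simpa using hb
          have key : ∀ p ∈ (y :: ys), x.1 < p.1 := by
            intro p hp
            rcases List.mem_cons.mp hp with rfl | hp'
            · exact hlt
            · exact lt_of_lt_of_le hlt (List.rel_of_pairwise_cons hpw hp')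
          have hnone : (y :: ys).find? (fun q => q.1 == c) = none := by
            rw [List.find?_eq_none]
            intro p hp
            simp only [beq_iff_eq]
            intro hpc
            have hk := key p hp
            rw [hxc, hpc] at hk
            exact lt_irrefl _ hk
          rw [hnone]
          simp [hxc]
      · rw [if_neg (by simpa using hlt)]
        rw [List.find?_cons, List.find?_cons]
        cases hy : (y.1 == c)
        · simp only [hy]
          exact ih (List.Pairwise.of_cons hpw)
        · simp only [hy]
          simp

theorem pv_find?_sorted {E : Type} (l : List (String × E)) (c : String) :
    (PySem.List.sorted l (fun p => p.1) false).find? (fun q => q.1 == c)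
      = l.find? (fun q => q.1 == c) := by
  induction l using List.reverseRecOn with
  | nil => simp [PySem.List.sorted]
  | append_singleton l x ih =>
      rw [PySem.List.sorted_eq_foldl_insertBy, List.foldl_append, List.foldl_cons, List.foldl_nil,
        ← PySem.List.sorted_eq_foldl_insertBy]
      rw [pv_find?_insertBy c x _ (PySem.List.sorted_pairwise l (fun p => p.1))]
      rw [ih, List.find?_append]
      cases hb : (x.1 == c) <;> simp [List.find?_cons, hb]

theorem pv_adj_fold {E : Type} :
    ∀ (T : List (String × E)), T.Pairwise (fun a b => a.1 ≤ b.1) →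
    ∀ (out : List E) (prev : Option String), (∀ p ∈ T, ∀ q, prev = some q → q ≤ p.1) →
    (T.foldl (fun (st : List E × Option String) p =>
        if some p.1 ≠ st.2 then (st.1 ++ [p.2], some p.1) else st) (out, prev)).1
      = out ++ (pvDD (T.filter (fun p => decide (some p.1 ≠ prev)))).map Prod.snd := by
  intro T
  induction T with
  | nil => intro _ out prev _; simp [pvDD_nil]
  | cons y t ih =>
      intro hpw out prev hinv
      rw [List.foldl_cons, List.filter_cons]
      by_cases hy : some y.1 = prev
      · rw [if_neg (by simp [hy]), if_neg (by simp [hy])]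
        exact ih (List.Pairwise.of_cons hpw) out prev (fun p hp => hinv p (List.mem_cons_of_mem _ hp))
      · rw [if_pos (by simp [hy]), if_pos (by simp [hy])]
        obtain ⟨c, e⟩ := y
        rw [pvDD_cons]
        have ht : t.filter (fun p => decide (some p.1 ≠ prev)) = t := by
          apply List.filter_eq_self.2
          intro p hp
          simp only [decide_eq_true_eq]
          intro hcontra
          have hq := hinv (c, e) (List.mem_cons_self) p.1 hcontra.symm
          have hc : c ≤ p.1 := List.rel_of_pairwise_cons hpw hp
          have hpc : p.1 = c := le_antisymm hq hc
          exact hy (by rw [← hcontra, hpc])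
        rw [ht]
        rw [ih (List.Pairwise.of_cons hpw) (out ++ [e]) (some c)
          (by intro p hp q hq; cases Option.some_inj.mp hq; exact List.rel_of_pairwise_cons hpw hp)]
        have hfc : t.filter (fun p => decide (some p.1 ≠ some c)) = t.filter (fun p => decide (p.1 ≠ c)) := by
          apply List.filter_congr
          intro p hp
          simp
        rw [hfc]
        simp

theorem pvPairs_snoc (es : List (List (String × String))) (e : List (String × String)) :
    pvPairs (es ++ [e]) = if pvCode e = "" then pvPairs es else pvPairs es ++ [(pvCode e, e)] := by
  simp only [pvPairs, List.foldl_append, List.foldl_cons, List.foldl_nil]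

theorem pv_dict_items (entries : List (List (String × String))) :
    (entries.foldl
      (fun (d : PySem.Dict String (List (String × String))) entry =>
        let code := pvCode entry
        if code = "" || d.contains code then d else d.insert code entry)
      PySem.Dict.empty).items = pvDD (pvPairs entries) := by
  induction entries using List.reverseRecOn with
  | nil => simp [pvPairs, pvDD_nil, PySem.Dict.empty]
  | append_singleton es e ih =>
      rw [List.foldl_append, List.foldl_cons, List.foldl_nil, pvPairs_snoc]
      set d := es.foldl
        (fun (d : PySem.Dict String (List (String × String))) entry =>
          let code := pvCode entry
          if code = "" || d.contains code then d else d.insert code entry)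
        PySem.Dict.empty with hd
      show (let code := pvCode e; if code = "" || d.contains code then d else d.insert code e).items = _
      simp only []
      by_cases h0 : pvCode e = ""
      · rw [if_pos h0, if_pos (by simp [h0])]
        exact ih
      · rw [if_neg h0]
        have hkeys : d.keys = (pvDD (pvPairs es)).map Prod.fst := by
          simp only [PySem.Dict.keys, ih]
        by_cases hc : d.contains (pvCode e) = true
        · rw [if_pos (by simp [hc]), ih, pvDD_snoc]
          have hmem : pvCode e ∈ (pvPairs es).map Prod.fst := by
            have := (PySem.Dict.contains_iff_mem_keys _ _).1 hc
            rw [hkeys] at this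
            exact (pvDD_mem_fst _ _).1 this
          rw [if_pos hmem]
          simp
        · rw [if_neg (by simp [h0, hc]), PySem.Dict.items_insert_of_not_contains (h := by simpa using hc), ih, pvDD_snoc]
          have hmem : pvCode e ∉ (pvPairs es).map Prod.fst := by
            intro hmem
            exact hc ((PySem.Dict.contains_iff_mem_keys _ _).2 (by rw [hkeys]; exact (pvDD_mem_fst _ _).2 hmem))
          rw [if_neg hmem]

theorem pvDD_pairwise_lt {E : Type} (l : List (String × E))
    (hle : l.Pairwise (fun a b => a.1 ≤ b.1)) :
    (pvDD l).Pairwise (fun a b => a.1 < b.1) := by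
  have h1 : (pvDD l).Pairwise (fun a b => a.1 ≤ b.1) :=
    hle.sublist (pvDD_sublist l)
  have h2 : (pvDD l).Pairwise (fun a b => a.1 ≠ b.1) :=
    (List.pairwise_map).1 (pvDD_keys_nodup l)
  exact (h1.and h2).imp (fun h => lt_of_le_of_ne h.1 h.2)

theorem pv_nodup_pairs {E : Type} (l : List (String × E)) : (pvDD l).Nodup :=
  (pvDD_keys_nodup l).of_map

theorem pv_crux {E : Type} [DecidableEq E] (L : List (String × E)) :
    PySem.List.sorted (pvDD L) (fun p => p.1) false
      = pvDD (PySem.List.sorted L (fun p => p.1) false) := by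
  apply PySem.List.sorted_eq_of_perm_of_pairwise_lt
  · apply (List.perm_ext_iff_of_nodup (pv_nodup_pairs _) (pv_nodup_pairs _)).2
    intro p
    rw [pv_mem_pvDD_iff, pv_mem_pvDD_iff, pv_find?_sorted]
  · exact pvDD_pairwise_lt _ (PySem.List.sorted_pairwise L (fun p => p.1))

theorem pv_A_eq (entries : List (List (String × String))) :
    dedupe_sorted_py entries
      = (PySem.List.sorted (pvDD (pvPairs entries)) (fun p => p.1) false).map Prod.snd := by
  unfold dedupe_sorted_py
  simp only []
  set d := entries.foldl
      (fun (d : PySem.Dict String (List (String × String))) entry =>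
        let code := pvCode entry
        if code = "" || d.contains code then d else d.insert code entry)
      PySem.Dict.empty with hd
  have hitems : d.items = pvDD (pvPairs entries) := pv_dict_items entries
  have hkeys : d.keys = (pvDD (pvPairs entries)).map Prod.fst := by
    simp only [PySem.Dict.keys, hitems]
  set S := PySem.List.sorted (pvDD (pvPairs entries)) (fun p => p.1) false with hS
  have hperm : S.Perm (pvDD (pvPairs entries)) := PySem.List.sorted_perm _ _ _
  have hSnodupkeys : (S.map Prod.fst).Nodup :=
    ((hperm.map Prod.fst).nodup_iff).2 (pvDD_keys_nodup _)
  have hSlt : S.Pairwise (fun a b => a.1 < b.1) := by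
    have h1 : S.Pairwise (fun a b => a.1 ≤ b.1) := PySem.List.sorted_pairwise _ _
    have h2 : S.Pairwise (fun a b => a.1 ≠ b.1) := (List.pairwise_map).1 hSnodupkeys
    exact (h1.and h2).imp (fun h => lt_of_le_of_ne h.1 h.2)
  have hsortkeys : PySem.List.sorted d.keys (fun k => k) false = S.map Prod.fst := by
    apply PySem.List.sorted_eq_of_perm_of_pairwise_lt
    · rw [hkeys]; exact hperm.map Prod.fst
    · exact (List.pairwise_map).2 hSlt
  rw [hsortkeys, List.map_map]
  apply List.map_congr_left
  intro p hp
  have hpmem : p ∈ d.items := by rw [hitems]; exact hperm.mem_iff.1 hp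
  have hnd : d.keys.Nodup := by rw [hkeys]; exact pvDD_keys_nodup _
  obtain ⟨k, v⟩ := p
  exact PySem.Dict.getD_of_mem_items d hpmem hnd []

theorem pv_B_eq (entries : List (List (String × String))) :
    dedupe_sorted_py_alt entries
      = (pvDD (PySem.List.sorted (pvPairs entries) (fun p => p.1) false)).map Prod.snd := by
  unfold dedupe_sorted_py_alt
  simp only []
  rw [pv_adj_fold _ (PySem.List.sorted_pairwise _ _) [] none (by intro p _ q h; cases h)]
  rw [List.filter_eq_self.2 (by intro p _; simp)]
  simp

-- ===== VERDICT (by name: the statement is the Claim_ definition above) =====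
theorem dedupe_sorted_py_spec : Claim_equal_dedupe_sorted_py := by
  intro entries _
  unfold Spec_dedupe_sorted_py
  rw [pv_A_eq, pv_B_eq, pv_crux]
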